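-- pv_equiv track=rewrite | github.com/al69114/workshop4 | backend/api.py | _suffix_after_compact_prefix
-- ===== SOURCE A (Python) =====
-- def _suffix_after_compact_prefix(text: str, prefix_length: int) -> str:
--     """Return the raw suffix after consuming prefix_length non-whitespace chars."""
--     consumed = 0
--     index = 0
--     while index < len(text) and consumed < prefix_length:
--         if not text[index].isspace():
--             consumed += 1
--         index += 1
--     return text[index:]
-- ===== SOURCE B (Python) =====
-- def _suffix_after_compact_prefix(text: str, prefix_length: int) -> str:
--     """Return the raw suffix after consuming prefix_length non-whitespace chars."""
--     if prefix_length <= 0: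
--         return text
--     positions = [i for i, c in enumerate(text) if not c.isspace()]
--     if prefix_length > len(positions):
--         return ""
--     return text[positions[prefix_length - 1] + 1:]
-- ===== Notes on version B (the rewrite author's own statement) =====
-- stated objective: alternative
-- what changed: Replaces the char-by-char consume-while loop with an index-table decomposition: build the list of positions of non-whitespace characters once, then answer with a single lookup and slice (whole text for prefix_length <= 0, empty string if fewer non-whitespace chars than prefix_length).
import Mathlib
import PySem

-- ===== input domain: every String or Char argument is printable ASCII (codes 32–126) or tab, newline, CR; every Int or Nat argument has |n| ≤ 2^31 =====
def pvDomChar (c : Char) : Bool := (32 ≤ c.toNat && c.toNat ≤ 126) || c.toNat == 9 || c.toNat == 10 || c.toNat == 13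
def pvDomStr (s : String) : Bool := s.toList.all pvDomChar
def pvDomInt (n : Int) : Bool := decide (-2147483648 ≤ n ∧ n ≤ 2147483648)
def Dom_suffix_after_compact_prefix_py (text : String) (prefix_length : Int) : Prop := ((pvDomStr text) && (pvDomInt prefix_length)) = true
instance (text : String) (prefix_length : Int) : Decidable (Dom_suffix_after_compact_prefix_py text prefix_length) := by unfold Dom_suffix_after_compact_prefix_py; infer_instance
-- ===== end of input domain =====

-- B replaces A's char-by-char consume-while loop by a positions-of-non-whitespace index
-- table plus a single lookup and slice (alternative decomposition, same cost).


-- ===== PORT A =====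
-- the while loop: advance index one char at a time, counting non-whitespace chars,
-- until prefix_length are consumed or the text ends; return the remaining suffix
def pvGoA (cs : List Char) (consumed prefix_length : Int) : List Char :=
  match cs with
  | [] => []
  | c :: rest =>
    if consumed < prefix_length then
      pvGoA rest (if ¬ PySem.Chars.isspace c then consumed + 1 else consumed) prefix_length
    else c :: rest

def suffix_after_compact_prefix_py (text : String) (prefix_length : Int) : String :=
  String.ofList (pvGoA text.toList 0 prefix_length)

-- ===== PORT B =====
-- positions = [i for i, c in enumerate(text) if not c.isspace()]
def pvPositions (cs : List Char) : List Int :=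
  ((PySem.List.enumerate cs).filter (fun p => ! PySem.Chars.isspace p.2)).map (·.1)

def suffix_after_compact_prefix_py_alt (text : String) (prefix_length : Int) : String :=
  if prefix_length ≤ 0 then text
  else
    let positions := pvPositions text.toList
    if prefix_length > (positions.length : Int) then ""
    else String.ofList (PySem.List.slice text.toList
      (some (PySem.List.pyGetD positions (prefix_length - 1) 0 + 1)) none)

-- ===== PRECONDITION & SPEC =====
def Spec_suffix_after_compact_prefix_py (text : String) (prefix_length : Int) (out : String) : Prop := out = suffix_after_compact_prefix_py_alt text prefix_length
instance (text : String) (prefix_length : Int) (out : String) : Decidable (Spec_suffix_after_compact_prefix_py text prefix_length out) := by unfold Spec_suffix_after_compact_prefix_py; infer_instance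

-- ===== CLAIM (what is proved, stated in full; the proofs are below) =====
def Claim_equal_suffix_after_compact_prefix_py : Prop := ∀ (text : String) (prefix_length : Int), Dom_suffix_after_compact_prefix_py text prefix_length → Spec_suffix_after_compact_prefix_py text prefix_length (suffix_after_compact_prefix_py text prefix_length)

-- ===== LEMMAS AND PROOFS =====

-- Nat-indexed positions of non-whitespace chars (proof-side characterisation)
def pvPosNat (cs : List Char) : List Nat :=
  match cs with
  | [] => []
  | c :: rest =>
    if PySem.Chars.isspace c then (pvPosNat rest).map (· + 1)
    else 0 :: (pvPosNat rest).map (· + 1)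

theorem pvPositions_eq (cs : List Char) (s : Int) :
    ((PySem.List.enumerate cs s).filter (fun p => ! PySem.Chars.isspace p.2)).map (·.1)
      = (pvPosNat cs).map (fun j : Nat => s + (j : Int)) := by
  induction cs generalizing s with
  | nil => simp only [PySem.List.enumerate_nil, List.filter_nil, List.map_nil, pvPosNat]
  | cons c rest ih =>
    rw [PySem.List.enumerate_cons]
    by_cases hs : PySem.Chars.isspace c
    · rw [List.filter_cons_of_neg (by simp [hs]), ih, show pvPosNat (c :: rest)
        = (pvPosNat rest).map (· + 1) from by simp [pvPosNat, hs], List.map_map]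
      exact List.map_congr_left (fun x _ => by simp [Function.comp]; ring)
    · rw [List.filter_cons_of_pos (by simp [hs]), List.map_cons, ih, show pvPosNat (c :: rest)
        = 0 :: (pvPosNat rest).map (· + 1) from by simp [pvPosNat, hs], List.map_cons,
        List.map_map]
      refine congrArg₂ _ (by simp) ?_
      exact List.map_congr_left (fun x _ => by simp [Function.comp]; ring)

theorem pvGoA_shift (cs : List Char) (a k : Int) :
    pvGoA cs a k = pvGoA cs 0 (k - a) := by
  induction cs generalizing a k with
  | nil => simp [pvGoA]
  | cons c rest ih =>
    simp only [pvGoA]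
    by_cases h : a < k
    · have h' : (0:Int) < k - a := by omega
      rw [if_pos h, if_pos h']
      by_cases hs : PySem.Chars.isspace c
      · rw [if_neg (by simp [hs]), if_neg (by simp [hs]), ih a k, ih 0 (k - a),
          show k - a - 0 = k - a from by omega]
      · rw [if_pos (by simp [hs]), if_pos (by simp [hs]), ih (a + 1) k, ih (0 + 1) (k - a),
          show k - (a + 1) = k - a - (0 + 1) from by omega]
    · have h' : ¬ (0:Int) < k - a := by omega
      rw [if_neg h, if_neg h']

theorem pvGoA_nonpos (cs : List Char) (k : Int) (hk : k ≤ 0) :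
    pvGoA cs 0 k = cs := by
  have h : ¬ (0:Int) < k := by omega
  cases cs with
  | nil => simp [pvGoA]
  | cons c rest => simp [pvGoA, h]

theorem pvGoA_key (cs : List Char) (n : Nat) :
    pvGoA cs 0 ((n : Int) + 1) =
      match (pvPosNat cs)[n]? with
      | none => []
      | some j => cs.drop (j + 1) := by
  induction cs generalizing n with
  | nil => simp [pvGoA, pvPosNat]
  | cons c rest ih =>
    have h01 : (0:Int) < (n : Int) + 1 := by omega
    simp only [pvGoA]
    rw [if_pos h01]
    by_cases hs : PySem.Chars.isspace c
    · rw [if_neg (by simp [hs]),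
        show pvPosNat (c :: rest) = (pvPosNat rest).map (· + 1) from by simp [pvPosNat, hs],
        ih n]
      cases h : (pvPosNat rest)[n]? <;> simp [List.getElem?_map, h]
    · rw [if_pos (by simp [hs]), pvGoA_shift,
        show pvPosNat (c :: rest) = 0 :: (pvPosNat rest).map (· + 1) from by
          simp [pvPosNat, hs]]
      cases n with
      | zero =>
        rw [show ((0 : Nat) : Int) + 1 - (0 + 1) = 0 from by omega, pvGoA_nonpos rest 0 le_rfl]
        simp
      | succ m =>
        rw [show ((m + 1 : Nat) : Int) + 1 - (0 + 1) = (m : Int) + 1 from by omega,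
          ih m]
        cases h : (pvPosNat rest)[m]? <;> simp [List.getElem?_map, h]

theorem suffix_after_compact_prefix_py_eq (text : String) (prefix_length : Int) :
    suffix_after_compact_prefix_py text prefix_length
      = suffix_after_compact_prefix_py_alt text prefix_length := by
  unfold suffix_after_compact_prefix_py suffix_after_compact_prefix_py_alt
  by_cases hk : prefix_length ≤ 0
  · rw [if_pos hk, pvGoA_nonpos _ _ hk]
    simp
  · rw [if_neg hk]
    obtain ⟨n, hn⟩ : ∃ n : Nat, prefix_length = (n : Int) + 1 :=
      ⟨(prefix_length - 1).toNat, by omega⟩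
    subst hn
    rw [pvGoA_key text.toList n]
    have hpos : pvPositions text.toList = (pvPosNat text.toList).map (fun j : Nat => (j : Int)) := by
      unfold pvPositions
      rw [pvPositions_eq]
      exact List.map_congr_left (fun x _ => by omega)
    rw [hpos]
    cases h : (pvPosNat text.toList)[n]? with
    | none =>
      have hlen : (pvPosNat text.toList).length ≤ n := by
        by_contra hc
        rw [List.getElem?_eq_getElem (by omega)] at h
        simp at h
      rw [if_pos (by rw [List.length_map]; exact_mod_cast by omega)]
    | some j =>
      have hlt : n < (pvPosNat text.toList).length := by
        by_contra hc
        rw [List.getElem?_eq_none (by omega)] at h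
        simp at h
      rw [if_neg (by rw [List.length_map]; omega)]
      have hget : PySem.List.pyGetD ((pvPosNat text.toList).map (fun j : Nat => (j : Int)))
          ((n : Int) + 1 - 1) 0 = (j : Int) := by
        rw [show ((n : Int) + 1 - 1) = ((n : Nat) : Int) from by omega,
          PySem.List.pyGetD_natCast, List.getD_eq_getElem?_getD, List.getElem?_map, h]
        simp
      rw [hget, show ((j : Int) + 1) = (((j + 1 : Nat)) : Int) from by push_cast; ring,
        PySem.List.slice_from_natCast]

-- ===== VERDICT (by name: the statement is the Claim_ definition above) =====
theorem suffix_after_compact_prefix_py_spec : Claim_equal_suffix_after_compact_prefix_py := by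
  intro text prefix_length _
  exact suffix_after_compact_prefix_py_eq text prefix_length
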